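-- pv_equiv track=rewrite | github.com/AadiBhumihar/Algorithm | 8_queen_dfs.py | check_solvability
-- ===== SOURCE A (Python) =====
-- def check_solvability(state) :
--     new_state = state[:]
--     count =0
--     for ix in range(1,len(new_state)-1) :
--         for iy in range(ix+1,len(new_state)-1) :
--             if(new_state[ix]>new_state[iy]) and (new_state[iy]!=0) :
--                 count = count +1
--
--     if (count % 2) == 0 :
--         return True;
--     else :
--         return False;
-- ===== SOURCE B (Python) =====
-- def check_solvability(state):
--     sub = state[1:len(state) - 1]
--
--     def sort_count(xs):
--         # returns (sorted xs, number of pairs i<j with xs[i]>xs[j] and xs[j]!=0)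
--         if len(xs) <= 1:
--             return xs, 0
--         m = len(xs) // 2
--         left, cl = sort_count(xs[:m])
--         right, cr = sort_count(xs[m:])
--         merged = []
--         c = cl + cr
--         i = j = 0
--         while i < len(left) and j < len(right):
--             if left[i] <= right[j]:
--                 merged.append(left[i])
--                 i += 1
--             else:
--                 if right[j] != 0:
--                     c += len(left) - i
--                 merged.append(right[j])
--                 j += 1
--         merged.extend(left[i:])
--         merged.extend(right[j:])
--         return merged, c
--
--     _, c = sort_count(sub)
--     return c % 2 == 0
-- ===== Notes on version B (the rewrite author's own statement) =====
-- stated objective: faster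
-- what changed: Replaced the quadratic nested index loops with a merge-sort that counts, during each merge, only inversions whose right element is nonzero, on the slice state[1:-1].
import Mathlib
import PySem

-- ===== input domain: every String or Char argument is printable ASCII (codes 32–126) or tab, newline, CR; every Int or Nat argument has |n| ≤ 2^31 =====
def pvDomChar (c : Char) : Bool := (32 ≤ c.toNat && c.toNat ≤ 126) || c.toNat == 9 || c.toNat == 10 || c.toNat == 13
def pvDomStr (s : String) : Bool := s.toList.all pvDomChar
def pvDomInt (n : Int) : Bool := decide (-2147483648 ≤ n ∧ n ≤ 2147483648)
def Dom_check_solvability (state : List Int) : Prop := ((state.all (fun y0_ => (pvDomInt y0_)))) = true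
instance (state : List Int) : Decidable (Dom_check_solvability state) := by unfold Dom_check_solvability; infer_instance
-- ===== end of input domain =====

-- B replaces A's quadratic nested index loops by a merge-sort that counts the restricted
-- inversions (right element nonzero) during each merge, on the slice state[1:len-1].

-- ===== PORT A =====
def check_solvability (state : List Int) : Bool :=
  let new_state := state
  let count : Int :=
    (PySem.List.pyRange 1 ((new_state.length : Int) - 1) 1).foldl (fun c ix =>
      (PySem.List.pyRange (ix + 1) ((new_state.length : Int) - 1) 1).foldl (fun c iy =>
        if PySem.List.pyGetD new_state ix 0 > PySem.List.pyGetD new_state iy 0 ∧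
           PySem.List.pyGetD new_state iy 0 ≠ 0 then c + 1 else c) c) 0
  if PySem.Int.mod count 2 == 0 then true else false

-- ===== PORT B =====
-- merge loop of Source B: consume the two sorted runs from the front; when the right head wins
-- and is nonzero, add the number of elements remaining in the left run.
def mergeCount : List Int → List Int → List Int × Nat
  | [], r => (r, 0)
  | a :: l, [] => (a :: l, 0)
  | a :: l, b :: r =>
    if a ≤ b then
      let p := mergeCount l (b :: r)
      (a :: p.1, p.2)
    else
      let p := mergeCount (a :: l) r
      (b :: p.1, p.2 + if b ≠ 0 then (a :: l).length else 0)

def sortCount (xs : List Int) : List Int × Nat :=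
  if _h : xs.length ≤ 1 then (xs, 0)
  else
    let p1 := sortCount (xs.take (xs.length / 2))
    let p2 := sortCount (xs.drop (xs.length / 2))
    let p3 := mergeCount p1.1 p2.1
    (p3.1, p1.2 + p2.2 + p3.2)
termination_by xs.length
decreasing_by
  · simp only [List.length_take]; omega
  · simp only [List.length_drop]; omega

def check_solvability_alt (state : List Int) : Bool :=
  let sub := PySem.List.slice state (some 1) (some ((state.length : Int) - 1))
  (sortCount sub).2 % 2 == 0

-- ===== PRECONDITION & SPEC =====
def Spec_check_solvability (state : List Int) (out : Bool) : Prop := out = check_solvability_alt state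
instance (state : List Int) (out : Bool) : Decidable (Spec_check_solvability state out) := by unfold Spec_check_solvability; infer_instance

-- ===== CLAIM (what is proved, stated in full; the proofs are below) =====
def Claim_equal_check_solvability : Prop := ∀ (state : List Int), Dom_check_solvability state → Spec_check_solvability state (check_solvability state)

-- ===== LEMMAS AND PROOFS =====

-- number of elements of r that are below x and nonzero
def rcount (x : Int) (r : List Int) : Nat := r.countP (fun y => decide (y < x ∧ y ≠ 0))

-- restricted inversion count: pairs i < j with xs[i] > xs[j] and xs[j] ≠ 0
def invc : List Int → Nat
  | [] => 0
  | x :: xs => rcount x xs + invc xs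

-- restricted cross inversions between two blocks
def crossc (l r : List Int) : Nat := (l.map (fun x => rcount x r)).sum

theorem rcount_append (x : Int) (r s : List Int) :
    rcount x (r ++ s) = rcount x r + rcount x s := by
  simp [rcount, List.countP_append]

theorem invc_append (l r : List Int) : invc (l ++ r) = invc l + invc r + crossc l r := by
  induction l with
  | nil => simp [invc, crossc]
  | cons a l ih => simp [invc, rcount_append, crossc, ih]; ring

theorem crossc_perm_left {l l' : List Int} (r : List Int) (h : l.Perm l') :
    crossc l r = crossc l' r := (h.map _).sum_eq

theorem crossc_perm_right (l : List Int) {r r' : List Int} (h : r.Perm r') :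
    crossc l r = crossc l r' := by
  unfold crossc
  exact congrArg List.sum (List.map_congr_left (fun x _ => h.countP_eq _))

theorem crossc_cons_right (l : List Int) (b : Int) (r : List Int) :
    crossc l (b :: r) = crossc l [b] + crossc l r := by
  unfold crossc
  induction l with
  | nil => simp
  | cons a l ih =>
    simp only [List.map_cons, List.sum_cons, ih]
    have : rcount a (b :: r) = rcount a [b] + rcount a r := by
      simpa using rcount_append a [b] r
    omega

theorem mergeCount_perm (l r : List Int) : (mergeCount l r).1.Perm (l ++ r) := by
  fun_induction mergeCount l r with
  | case1 r => simp
  | case2 a l => simp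
  | case3 a l b r hab p ih => simpa [p] using ih.cons a
  | case4 a l b r hab p ih => simpa [p] using (ih.cons b).trans List.perm_middle.symm

theorem mergeCount_sorted : ∀ {l r : List Int}, l.Pairwise (· ≤ ·) → r.Pairwise (· ≤ ·) →
    (mergeCount l r).1.Pairwise (· ≤ ·) := by
  intro l r hl hr
  fun_induction mergeCount l r with
  | case1 r => simpa using hr
  | case2 a l => simpa using hl
  | case3 a l b r hab p ih =>
      simp only [p]
      refine List.pairwise_cons.2 ⟨?_, ih hl.of_cons hr⟩
      intro x hx
      have hx' : x ∈ l ++ b :: r := (mergeCount_perm l (b :: r)).subset hx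
      rcases List.mem_append.1 hx' with h | h
      · exact (List.pairwise_cons.1 hl).1 x h
      · rcases List.mem_cons.1 h with rfl | h
        · exact hab
        · exact le_trans hab ((List.pairwise_cons.1 hr).1 x h)
  | case4 a l b r hab p ih =>
      simp only [p]
      refine List.pairwise_cons.2 ⟨?_, ih hl hr.of_cons⟩
      intro x hx
      have hba : b < a := lt_of_not_ge hab
      have hx' : x ∈ (a :: l) ++ r := (mergeCount_perm (a :: l) r).subset hx
      rcases List.mem_append.1 hx' with h | h
      · rcases List.mem_cons.1 h with rfl | h
        · exact le_of_lt hba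
        · exact le_trans (le_of_lt hba) ((List.pairwise_cons.1 hl).1 x h)
      · exact (List.pairwise_cons.1 hr).1 x h

theorem crossc_singleton {m : List Int} {b : Int} (h : ∀ x ∈ m, b < x) :
    crossc m [b] = if b ≠ 0 then m.length else 0 := by
  induction m with
  | nil => simp [crossc]
  | cons a m ih =>
    have h1 : crossc m [b] = if b ≠ 0 then m.length else 0 := ih (fun x hx => h x (List.mem_cons_of_mem a hx))
    have h2 : rcount a [b] = if b ≠ 0 then 1 else 0 := by
      have hba : b < a := h a List.mem_cons_self
      by_cases hb : b = 0 <;> simp [rcount, hba, hb]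
    simp only [crossc, List.map_cons, List.sum_cons] at *
    rw [h1, h2]
    by_cases hb : b = 0 <;> simp [hb] <;> omega

theorem mergeCount_count : ∀ {l r : List Int}, l.Pairwise (· ≤ ·) → r.Pairwise (· ≤ ·) →
    (mergeCount l r).2 = crossc l r := by
  intro l r hl hr
  fun_induction mergeCount l r with
  | case1 r => simp [crossc]
  | case2 a l => simp [crossc, rcount]
  | case3 a l b r hab p ih =>
      have hra : rcount a (b :: r) = 0 := by
        refine List.countP_eq_zero.2 ?_
        intro y hy
        rcases List.mem_cons.1 hy with rfl | hy
        · simp; intro hlt; omega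
        · have : b ≤ y := (List.pairwise_cons.1 hr).1 y hy
          simp; intro hlt; omega
      have : crossc (a :: l) (b :: r) = rcount a (b :: r) + crossc l (b :: r) := by
        simp [crossc]
      simp only [p, this, hra, Nat.zero_add]
      exact ih hl.of_cons hr
  | case4 a l b r hab p ih =>
      have hba : b < a := lt_of_not_ge hab
      have hall : ∀ x ∈ a :: l, b < x := by
        intro x hx
        rcases List.mem_cons.1 hx with rfl | hx
        · exact hba
        · exact lt_of_lt_of_le hba ((List.pairwise_cons.1 hl).1 x hx)
      have hsing := crossc_singleton hall
      simp only [p, crossc_cons_right, hsing, ih hl hr.of_cons]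
      by_cases hb : b = 0 <;> simp [hb] <;> omega

theorem sortCount_spec (xs : List Int) :
    (sortCount xs).1.Perm xs ∧ (sortCount xs).1.Pairwise (· ≤ ·) ∧ (sortCount xs).2 = invc xs := by
  fun_induction sortCount xs with
  | case1 xs h =>
      match xs, h with
      | [], _ => simp [invc]
      | [x], _ => simp [invc, rcount]
  | case2 xs h p1 p2 p3 ih1 ih2 =>
      obtain ⟨hp1, hs1, hc1⟩ := ih1
      obtain ⟨hp2, hs2, hc2⟩ := ih2
      simp only [p3, p1, p2]
      refine ⟨?_, mergeCount_sorted hs1 hs2, ?_⟩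
      · exact (mergeCount_perm _ _).trans
          ((hp1.append hp2).trans (by rw [List.take_append_drop]))
      · have hcr : (mergeCount (sortCount (List.take (xs.length / 2) xs)).1
            (sortCount (List.drop (xs.length / 2) xs)).1).2
            = crossc (List.take (xs.length / 2) xs) (List.drop (xs.length / 2) xs) := by
          rw [mergeCount_count hs1 hs2, crossc_perm_left _ hp1, crossc_perm_right _ hp2]
        have hinv : invc xs = invc (List.take (xs.length / 2) xs) + invc (List.drop (xs.length / 2) xs)
            + crossc (List.take (xs.length / 2) xs) (List.drop (xs.length / 2) xs) := by
          conv_lhs => rw [← List.take_append_drop (xs.length / 2) xs]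
          exact invc_append _ _
        rw [hc1, hc2, hcr, hinv]

theorem pyGetD_dropLast (state : List Int) (i : Int) (h0 : 0 ≤ i)
    (h1 : i < (state.length : Int) - 1) :
    PySem.List.pyGetD state i 0 = PySem.List.pyGetD state.dropLast i 0 := by
  rw [PySem.List.pyGetD_eq_getElem state 0 h0 (by omega),
    PySem.List.pyGetD_eq_getElem state.dropLast 0 h0
      (by simp only [List.length_dropLast]; omega)]
  exact (List.getElem_dropLast ..).symm

-- value of the inner 'for iy' loop of A
theorem inner_eq (state : List Int) (ix : Int) (h0 : 0 ≤ ix)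
    (h1 : ix < (state.length : Int) - 1) (c : Int) :
    (PySem.List.pyRange (ix + 1) ((state.length : Int) - 1) 1).foldl (fun c iy =>
        if PySem.List.pyGetD state ix 0 > PySem.List.pyGetD state iy 0 ∧
           PySem.List.pyGetD state iy 0 ≠ 0 then c + 1 else c) c
    = c + (rcount (PySem.List.pyGetD state.dropLast ix 0)
        (state.dropLast.drop (ix.toNat + 1)) : Int) := by
  have hd : ((state.dropLast.length : Nat) : Int) = (state.length : Int) - 1 := by
    simp only [List.length_dropLast]
    omega
  have key : (PySem.List.pyRange (ix + 1) ((state.length : Int) - 1) 1).countP (fun iy =>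
        decide (PySem.List.pyGetD state ix 0 > PySem.List.pyGetD state iy 0 ∧
          PySem.List.pyGetD state iy 0 ≠ 0))
      = rcount (PySem.List.pyGetD state.dropLast ix 0)
        (state.dropLast.drop (ix.toNat + 1)) := by
    rw [← hd]
    refine (List.countP_congr (q := fun iy =>
        decide (PySem.List.pyGetD state.dropLast iy 0 <
            PySem.List.pyGetD state.dropLast ix 0 ∧
          PySem.List.pyGetD state.dropLast iy 0 ≠ 0)) ?_).trans ?_
    · intro iy hiy
      have hm := (PySem.List.mem_pyRange_one).1 hiy
      rw [pyGetD_dropLast state ix h0 h1,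
        pyGetD_dropLast state iy (by omega) (by omega)]
    · rw [rcount, show ix.toNat + 1 = (ix + 1).toNat by omega,
        ← PySem.List.map_pyGetD_pyRange' state.dropLast 0
          (show (0 : Int) ≤ ix + 1 by omega), List.countP_map]
      rfl
  rw [PySem.List.foldl_ite_add_one, key]

-- the outer 'for ix' loop of A, from index a upward
theorem outer_aux (state : List Int) : ∀ (n : Nat) (a c : Int), 0 ≤ a →
    ((state.length : Int) - 1 - a).toNat ≤ n →
    (PySem.List.pyRange a ((state.length : Int) - 1) 1).foldl (fun c ix =>
      (PySem.List.pyRange (ix + 1) ((state.length : Int) - 1) 1).foldl (fun c iy =>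
        if PySem.List.pyGetD state ix 0 > PySem.List.pyGetD state iy 0 ∧
           PySem.List.pyGetD state iy 0 ≠ 0 then c + 1 else c) c) c
    = c + (invc (state.dropLast.drop a.toNat) : Int) := by
  intro n
  induction n with
  | zero =>
    intro a c ha hn
    have hle : (state.length : Int) - 1 ≤ a := by omega
    have hdl : state.dropLast.length ≤ a.toNat := by
      simp only [List.length_dropLast]; omega
    rw [PySem.List.pyRange_one_eq_nil hle, List.drop_eq_nil_of_le hdl]
    simp [invc]
  | succ n ih =>
    intro a c ha hn
    by_cases hle : (state.length : Int) - 1 ≤ a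
    · have hdl : state.dropLast.length ≤ a.toNat := by
        simp only [List.length_dropLast]; omega
      rw [PySem.List.pyRange_one_eq_nil hle, List.drop_eq_nil_of_le hdl]
      simp [invc]
    · have hlt : a < (state.length : Int) - 1 := by omega
      rw [PySem.List.pyRange_one_cons hlt, List.foldl_cons,
        inner_eq state a ha hlt c, ih (a + 1) _ (by omega) (by omega)]
      have hdl : a.toNat < state.dropLast.length := by
        simp only [List.length_dropLast]; omega
      have hget : PySem.List.pyGetD state.dropLast a 0 = state.dropLast[a.toNat] :=
        PySem.List.pyGetD_eq_getElem state.dropLast 0 ha (by omega)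
      rw [show (a + 1).toNat = a.toNat + 1 by omega, hget,
        List.drop_eq_getElem_cons hdl]
      simp only [invc]
      push_cast
      ring

-- the full double loop of A
theorem count_eq (state : List Int) :
    (PySem.List.pyRange 1 ((state.length : Int) - 1) 1).foldl (fun c ix =>
      (PySem.List.pyRange (ix + 1) ((state.length : Int) - 1) 1).foldl (fun c iy =>
        if PySem.List.pyGetD state ix 0 > PySem.List.pyGetD state iy 0 ∧
           PySem.List.pyGetD state iy 0 ≠ 0 then c + 1 else c) c) 0
    = (invc (state.dropLast.drop 1) : Int) := by
  have h := outer_aux state ((state.length : Int) - 2).toNat 1 0 (by omega) (by omega)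
  simpa using h

-- state[1:len(state)-1] of a nonempty list is dropLast then tail
theorem slice_eq (state : List Int) (hne : state ≠ []) :
    PySem.List.slice state (some 1) (some ((state.length : Int) - 1))
      = state.dropLast.drop 1 := by
  have hlen : 1 ≤ state.length := List.length_pos_of_ne_nil hne
  rw [PySem.List.slice_toNat state (by omega) (by omega)]
  rw [List.dropLast_eq_take, List.drop_take]
  congr 1
  omega

theorem mod2_eq (c : Nat) : (PySem.Int.mod ((c : Nat) : Int) 2 == 0) = (c % 2 == 0) := by
  rw [PySem.Int.mod, Int.fmod_eq_emod]
  have h2 : ((c : Int)) % 2 = ((c % 2 : Nat) : Int) := by push_cast; rfl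
  simp only [h2]
  rcases Nat.mod_two_eq_zero_or_one c with h | h <;> simp [h]

-- ===== VERDICT (by name: the statement is the Claim_ definition above) =====
theorem check_solvability_spec : Claim_equal_check_solvability := by
  intro state _hdom
  unfold Spec_check_solvability check_solvability check_solvability_alt
  dsimp only
  rcases eq_or_ne state [] with rfl | hne
  · simp [PySem.List.pyRange_one_eq_nil, PySem.List.slice, sortCount, PySem.Int.mod]
  · rw [count_eq state, slice_eq state hne, (sortCount_spec (state.dropLast.drop 1)).2.2,
      mod2_eq]
    cases ((invc (state.dropLast.drop 1)) % 2 == 0) <;> simp
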